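-- pv_equiv track=rewrite | github.com/sethwv/game-thumbs | .github/workflows/scripts/format-changelog.py | format_changelog_section
-- ===== SOURCE A (Python) =====
-- def format_changelog_section(categories):
--     """Format categories and entries into proper changelog section"""
--     lines = []
--
--     # Standard category order
--     category_order = ['Added', 'Changed', 'Deprecated', 'Removed', 'Fixed', 'Security']
--
--     for category in category_order:
--         if category in categories and categories[category]:
--             lines.append(f"### {category}")
--             lines.append("")
--             for entry in categories[category]:
--                 lines.append(entry)
--             lines.append("")
--
--     # Add any other categories not in standard order
--     for category, entries in categories.items():
--         if category not in category_order and entries: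
--             lines.append(f"### {category}")
--             lines.append("")
--             for entry in entries:
--                 lines.append(entry)
--             lines.append("")
--
--     return '\n'.join(lines)
-- ===== SOURCE B (Python) =====
-- def format_changelog_section(categories):
--     """Format categories and entries into proper changelog section"""
--     category_order = ['Added', 'Changed', 'Deprecated', 'Removed', 'Fixed', 'Security']
--     rank = {c: i for i, c in enumerate(category_order)}
--     ordered = sorted(categories, key=lambda c: rank.get(c, len(category_order)))
--     blocks = ["### %s\n\n%s\n" % (c, "\n".join(categories[c]))
--               for c in ordered if categories[c]]
--     return "\n".join(blocks)
-- ===== Notes on version B (the rewrite author's own statement) =====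
-- stated objective: simpler
-- what changed: A's two hand-ordered emission passes (fixed-order loop plus leftover-items loop, each appending individual lines) are replaced by computing the emission order once via a stable sort on a rank dictionary and one uniform pass that maps each truthy category to its block string and joins the blocks.
import Mathlib
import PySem

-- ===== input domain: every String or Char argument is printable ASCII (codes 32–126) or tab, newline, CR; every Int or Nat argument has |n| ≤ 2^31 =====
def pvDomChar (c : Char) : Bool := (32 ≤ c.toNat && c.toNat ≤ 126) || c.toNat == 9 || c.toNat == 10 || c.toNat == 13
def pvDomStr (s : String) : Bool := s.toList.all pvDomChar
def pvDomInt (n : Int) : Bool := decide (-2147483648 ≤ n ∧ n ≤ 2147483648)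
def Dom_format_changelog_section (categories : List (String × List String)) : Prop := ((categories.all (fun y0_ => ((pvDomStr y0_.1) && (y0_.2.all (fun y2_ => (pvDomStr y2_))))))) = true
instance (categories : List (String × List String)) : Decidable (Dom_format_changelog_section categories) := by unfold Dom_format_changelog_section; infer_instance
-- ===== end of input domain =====

-- B replaces A's two hand-ordered emission passes by a single pass over the keys
-- stably sorted by a standard-order rank, emitting one block string per category
-- and joining the blocks (objective: simpler). Equivalence of RETURN values only.

-- ===== PORT A =====
def format_changelog_section (categories : List (String × List String)) : String :=
  let category_order : List String := ["Added", "Changed", "Deprecated", "Removed", "Fixed", "Security"]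
  -- first loop: standard categories in fixed order
  let lines : List String :=
    category_order.foldl (fun lines category =>
      match PySem.Dict.get? (PySem.Dict.mk categories) category with
      | none => lines
      | some entries =>
        if entries ≠ [] then
          (entries.foldl (fun l e => l ++ [e]) ((lines ++ ["### " ++ category]) ++ [""])) ++ [""]
        else lines) []
  -- second loop: remaining categories in dict insertion order
  let lines : List String :=
    categories.foldl (fun lines cp =>
      if cp.1 ∉ category_order ∧ cp.2 ≠ [] then
        (cp.2.foldl (fun l e => l ++ [e]) ((lines ++ ["### " ++ cp.1]) ++ [""])) ++ [""]
      else lines) lines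
  PySem.Str.join "\n" lines

-- ===== PORT B =====
def format_changelog_section_alt (categories : List (String × List String)) : String :=
  let category_order : List String := ["Added", "Changed", "Deprecated", "Removed", "Fixed", "Security"]
  let rank : PySem.Dict String Int :=
    (PySem.List.enumerate category_order 0).foldl (fun d ic => PySem.Dict.insert d ic.2 ic.1) PySem.Dict.empty
  let ordered : List String :=
    PySem.List.sorted (categories.map (·.1))
      (fun c => PySem.Dict.getD rank c (PySem.List.len category_order)) false
  let blocks : List String :=
    (ordered.filter (fun c => PySem.Dict.getD (PySem.Dict.mk categories) c [] ≠ [])).map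
      (fun c => "### " ++ c ++ "\n\n" ++ PySem.Str.join "\n" (PySem.Dict.getD (PySem.Dict.mk categories) c []) ++ "\n")
  PySem.Str.join "\n" blocks

-- ===== PRECONDITION & SPEC =====
-- Pre_ excludes association lists with duplicate keys, which no Python dict input can
-- produce and on which A's first-match lookups versus pair iteration are accidental.
def Pre_format_changelog_section (categories : List (String × List String)) : Prop :=
  (categories.map Prod.fst).Nodup
instance (categories : List (String × List String)) : Decidable (Pre_format_changelog_section categories) := by
  unfold Pre_format_changelog_section; infer_instance
def pvWitness_format_changelog_section : (List (String × List String)) :=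
  [("Other", ["misc entry"]), ("Added", ["new thing"]), ("Fixed", [])]
def Spec_format_changelog_section (categories : List (String × List String)) (out : String) : Prop :=
  out = format_changelog_section_alt categories
instance (categories : List (String × List String)) (out : String) : Decidable (Spec_format_changelog_section categories out) := by
  unfold Spec_format_changelog_section; infer_instance

-- ===== CLAIM (what is proved, stated in full; the proofs are below) =====
def Claim_equal_format_changelog_section : Prop := ∀ (categories : List (String × List String)), Dom_format_changelog_section categories → Pre_format_changelog_section categories → Spec_format_changelog_section categories (format_changelog_section categories)

-- ===== LEMMAS AND PROOFS =====

-- the fixed standard order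
def pvOrder : List String := ["Added", "Changed", "Deprecated", "Removed", "Fixed", "Security"]

-- B's sort key, closed form
def pvKey (c : String) : Int :=
  PySem.Dict.getD
    ((PySem.List.enumerate pvOrder 0).foldl (fun d ic => PySem.Dict.insert d ic.2 ic.1) PySem.Dict.empty) c 6

-- the lines a category contributes in A / the block string it contributes in B
def pvLines (p : String × List String) : List String := ["### " ++ p.1, ""] ++ p.2 ++ [""]
def pvBlock (p : String × List String) : String :=
  "### " ++ p.1 ++ "\n\n" ++ PySem.Str.join "\n" p.2 ++ "\n"

-- key facts
theorem pvKey_eq (c : String) :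
    pvKey c = if c = "Security" then 5 else if c = "Fixed" then 4 else if c = "Removed" then 3
      else if c = "Deprecated" then 2 else if c = "Changed" then 1 else if c = "Added" then 0
      else 6 := by
  have h : pvKey c = PySem.Dict.getD ((((((PySem.Dict.empty.insert "Added" (0:Int)).insert
      "Changed" 1).insert "Deprecated" 2).insert "Removed" 3).insert "Fixed" 4).insert
      "Security" 5) c 6 := rfl
  rw [h]
  simp [PySem.Dict.getD_insert, PySem.Dict.getD_empty]

theorem pvKey_not_mem {c : String} (h : c ∉ pvOrder) : pvKey c = 6 := by
  simp only [pvOrder, List.mem_cons, List.not_mem_nil, or_false, not_or] at h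
  rw [pvKey_eq]
  simp [h.1, h.2.1, h.2.2.1, h.2.2.2.1, h.2.2.2.2.1, h.2.2.2.2.2]

theorem pvKey_le6 (c : String) : pvKey c ≤ 6 := by
  rw [pvKey_eq]; split_ifs <;> norm_num

-- insertBy inserts after a no-insert prefix and before an all-insert suffix
theorem pv_insertBy_middle {α : Type} (before : α → α → Bool) (x : α) (L R : List α)
    (hL : ∀ y ∈ L, before x y = false) (hR : ∀ y ∈ R, before x y = true) :
    PySem.List.insertBy before x (L ++ R) = L ++ x :: R := by
  induction L with
  | nil =>
    simp only [List.nil_append]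
    cases R with
    | nil => simp [PySem.List.insertBy]
    | cons r rs => simp [PySem.List.insertBy, hR r (by simp)]
  | cons a L ih =>
    have ha : before x a = false := hL a (by simp)
    simp only [List.cons_append, PySem.List.insertBy, ha]
    simp only [Bool.false_eq_true, if_false, List.cons.injEq, true_and]
    exact ih (fun y hy => hL y (by simp [hy]))

-- one insertion-sort step for a standard category x at its position in pvOrder
theorem pv_sort_step (pre suf : List String) (x : String) (ks : List String)
    (horder : pvOrder = pre ++ x :: suf)
    (hpre : ∀ y ∈ pre, decide (pvKey x < pvKey y) = false)
    (hsuf : ∀ y ∈ suf, decide (pvKey x < pvKey y) = true)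
    (hx6 : pvKey x < 6) (hxks : x ∉ ks) :
    PySem.List.insertBy (fun a b => decide (pvKey a < pvKey b)) x
        (pvOrder.filter (· ∈ ks) ++ ks.filter (· ∉ pvOrder)) =
      pvOrder.filter (· ∈ ks ++ [x]) ++ (ks ++ [x]).filter (· ∉ pvOrder) := by
  have hndo : pvOrder.Nodup := by decide
  rw [horder] at hndo
  have hdisj := List.disjoint_of_nodup_append hndo
  have hxpre : x ∉ pre := fun hx => hdisj hx (by simp)
  have hxsuf : x ∉ suf := ((List.nodup_cons.mp hndo.of_append_right).1)
  have hxo : x ∈ pvOrder := by rw [horder]; simp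
  have hprefix : pre.filter (· ∈ ks ++ [x]) = pre.filter (· ∈ ks) := by
    apply List.filter_congr
    intro a ha
    have hax : a ≠ x := fun h => hxpre (h ▸ ha)
    simp [List.mem_append, hax]
  have hsufeq : suf.filter (· ∈ ks ++ [x]) = suf.filter (· ∈ ks) := by
    apply List.filter_congr
    intro a ha
    have hax : a ≠ x := fun h => hxsuf (h ▸ ha)
    simp [List.mem_append, hax]
  have hfL : pvOrder.filter (· ∈ ks) = pre.filter (· ∈ ks) ++ suf.filter (· ∈ ks) := by
    rw [horder, List.filter_append, List.filter_cons]
    simp [hxks]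
  have hfR1 : pvOrder.filter (· ∈ ks ++ [x]) = pre.filter (· ∈ ks) ++ x :: suf.filter (· ∈ ks) := by
    rw [horder, List.filter_append, List.filter_cons, hprefix, hsufeq]
    have hx' : decide (x ∈ ks ++ [x]) = true := by simp
    rw [hx']
    simp
  have hext : (ks ++ [x]).filter (· ∉ pvOrder) = ks.filter (· ∉ pvOrder) := by
    rw [List.filter_append, List.filter_cons]
    simp [hxo]
  rw [hfL, hfR1, hext, List.append_assoc]
  have := pv_insertBy_middle (fun a b => decide (pvKey a < pvKey b)) x
      (pre.filter (· ∈ ks)) (suf.filter (· ∈ ks) ++ ks.filter (· ∉ pvOrder))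
      (fun y hy => hpre y (List.mem_of_mem_filter hy))
      (by
        intro y hy
        rcases List.mem_append.mp hy with h | h
        · exact hsuf y (List.mem_of_mem_filter h)
        · have hyo : y ∉ pvOrder := by simpa using List.of_mem_filter h
          show decide (pvKey x < pvKey y) = true
          rw [pvKey_not_mem hyo]
          exact decide_eq_true hx6)
  simpa using this

-- the stable sort by rank groups standard categories first, extras last in order
theorem pv_sorted_char (ks : List String) (hnd : ks.Nodup) :
    PySem.List.sorted ks pvKey false =
      pvOrder.filter (· ∈ ks) ++ ks.filter (· ∉ pvOrder) := by
  rw [PySem.List.sorted_eq_foldl_insertBy]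
  induction ks using List.reverseRecOn with
  | nil => simp
  | append_singleton ks x ih =>
    have hnd' : ks.Nodup := hnd.of_append_left
    have hxks : x ∉ ks := fun hx => (List.disjoint_of_nodup_append hnd) hx (by simp)
    rw [List.foldl_append, List.foldl_cons, List.foldl_nil, ih hnd']
    by_cases hx : x ∈ pvOrder
    · simp only [pvOrder, List.mem_cons, List.not_mem_nil, or_false] at hx
      rcases hx with h | h | h | h | h | h <;> subst h
      · exact pv_sort_step [] ["Changed", "Deprecated", "Removed", "Fixed", "Security"] _ ks
          (by decide) (by decide) (by decide) (by decide) hxks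
      · exact pv_sort_step ["Added"] ["Deprecated", "Removed", "Fixed", "Security"] _ ks
          (by decide) (by decide) (by decide) (by decide) hxks
      · exact pv_sort_step ["Added", "Changed"] ["Removed", "Fixed", "Security"] _ ks
          (by decide) (by decide) (by decide) (by decide) hxks
      · exact pv_sort_step ["Added", "Changed", "Deprecated"] ["Fixed", "Security"] _ ks
          (by decide) (by decide) (by decide) (by decide) hxks
      · exact pv_sort_step ["Added", "Changed", "Deprecated", "Removed"] ["Security"] _ ks
          (by decide) (by decide) (by decide) (by decide) hxks
      · exact pv_sort_step ["Added", "Changed", "Deprecated", "Removed", "Fixed"] [] _ ks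
          (by decide) (by decide) (by decide) (by decide) hxks
    · rw [PySem.List.insertBy_of_forall_not_before _ _ _ (by
        intro y hy
        show decide (pvKey x < pvKey y) = false
        rw [pvKey_not_mem hx]
        exact decide_eq_false (not_lt.mpr (pvKey_le6 y)))]
      have hstd : pvOrder.filter (· ∈ ks ++ [x]) = pvOrder.filter (· ∈ ks) := by
        apply List.filter_congr
        intro a ha
        have hax : a ≠ x := fun h => hx (h ▸ ha)
        simp [List.mem_append, hax]
      have hext : (ks ++ [x]).filter (· ∉ pvOrder) = ks.filter (· ∉ pvOrder) ++ [x] := by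
        rw [List.filter_append, List.filter_cons]
        simp [hx]
      rw [hstd, hext, List.append_assoc]


-- first-match lookup in the association list, Python's categories[c] / .get(c, [])
def pvGetD (categories : List (String × List String)) (c : String) : List String :=
  PySem.Dict.getD (PySem.Dict.mk categories) c []

-- the common emission list: standard categories first, then extras, truthy only
def pvE (categories : List (String × List String)) : List (String × List String) :=
  (pvOrder.filter (fun c => pvGetD categories c ≠ [])).map (fun c => (c, pvGetD categories c))
    ++ categories.filter (fun p => p.1 ∉ pvOrder ∧ p.2 ≠ [])

theorem pv_decide_swap (a b : Prop) [Decidable a] [Decidable b] :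
    decide (a ∧ b) = (decide b && decide a) := by
  by_cases a <;> by_cases b <;> simp [*]

theorem pv_flatMap_filter {α β : Type} (l : List α) (p : α → Prop) [DecidablePred p]
    (f : α → List β) :
    l.flatMap (fun x => if p x then f x else []) = (l.filter (fun x => decide (p x))).flatMap f := by
  induction l with
  | nil => rfl
  | cons a l ih =>
    simp only [List.flatMap_cons, List.filter_cons]
    by_cases h : p a
    · simp [h, ih]
    · simp [h, ih]

theorem pvN {α β : Type} (l : List (α × β)) (F : α → β) (P : α → Bool) (Q : β → Bool)
    (hF : ∀ p ∈ l, F p.1 = p.2) :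
    ((l.map (fun p => p.1)).filter (fun c => Q (F c) && P c)).map (fun c => (c, F c)) =
      l.filter (fun p => Q p.2 && P p.1) := by
  induction l with
  | nil => rfl
  | cons p l ih =>
    have hp : F p.1 = p.2 := hF p (by simp)
    have ih' := ih (fun q hq => hF q (by simp [hq]))
    simp only [List.map_cons, List.filter_cons, hp]
    by_cases h : (Q p.2 && P p.1) = true
    · simp only [h, if_true, List.map_cons, ih']
      rw [hp]
    · simp only [h, if_false, ih']
      simp only [Bool.not_eq_true] at h
      simp [h, ih']

theorem pv_intercalate_cons_cons (sep a b : List Char) (l : List (List Char)) :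
    List.intercalate sep (a :: b :: l) = a ++ sep ++ List.intercalate sep (b :: l) := by
  simp [List.intercalate, List.intersperse]

theorem pv_intercalate_append (sep : List Char) (xs ys : List (List Char))
    (hxs : xs ≠ []) (hys : ys ≠ []) :
    List.intercalate sep (xs ++ ys) =
      List.intercalate sep xs ++ sep ++ List.intercalate sep ys := by
  induction xs with
  | nil => exact absurd rfl hxs
  | cons a xs ih =>
    cases xs with
    | nil =>
      cases ys with
      | nil => exact absurd rfl hys
      | cons b l =>
        simp only [List.singleton_append]
        rw [pv_intercalate_cons_cons]
        simp [List.intercalate]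
    | cons a2 xs2 =>
      have ih' := ih (by simp)
      rw [List.cons_append] at ih'
      rw [List.cons_append, List.cons_append, pv_intercalate_cons_cons, ih',
        pv_intercalate_cons_cons]
      simp [List.append_assoc]

theorem pv_block_chars (p : String × List String) (hp : p.2 ≠ []) :
    (pvBlock p).toList =
      List.intercalate "\n".toList (List.map String.toList (pvLines p)) := by
  obtain ⟨c, es⟩ := p
  cases es with
  | nil => exact absurd rfl hp
  | cons e es =>
    simp only [pvBlock, pvLines, List.cons_append, List.nil_append, List.map_cons,
      List.map_append, List.map_nil]
    rw [pv_intercalate_cons_cons, pv_intercalate_cons_cons, ← List.cons_append,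
      pv_intercalate_append _ _ _ (by simp) (by simp)]
    simp [String.toList_append, PySem.Str.toList_join, PySem.Chars.join, List.intercalate,
      List.append_assoc]

theorem pv_join_chars (E : List (String × List String)) (hE : ∀ p ∈ E, p.2 ≠ []) :
    List.intercalate "\n".toList (List.map String.toList (E.flatMap pvLines)) =
      List.intercalate "\n".toList (List.map String.toList (E.map pvBlock)) := by
  induction E with
  | nil => rfl
  | cons p E ih =>
    have hp : p.2 ≠ [] := hE p (by simp)
    have ih' := ih (fun q hq => hE q (by simp [hq]))
    cases E with
    | nil =>
      simp only [List.flatMap_cons, List.flatMap_nil, List.append_nil, List.map_cons,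
        List.map_nil]
      rw [pv_block_chars p hp]
      simp [List.intercalate]
    | cons q E' =>
      have hq : q.2 ≠ [] := hE q (by simp)
      have hflat : (q :: E').flatMap pvLines ≠ [] := by
        have : pvLines q ≠ [] := by simp [pvLines]
        simp only [List.flatMap_cons]
        intro hcontra
        exact this (List.append_eq_nil_iff.mp hcontra).1
      rw [List.flatMap_cons, List.map_append,
        pv_intercalate_append _ _ _ (by simp [pvLines]) (by simpa using hflat), ih',
        ← pv_block_chars p hp,
        show List.map String.toList (List.map pvBlock (q :: E')) =
          (pvBlock q).toList :: List.map String.toList (List.map pvBlock E') from by simp]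
      simp only [List.map_cons]
      rw [pv_intercalate_cons_cons]

theorem pv_join_flatMap (E : List (String × List String)) (hE : ∀ p ∈ E, p.2 ≠ []) :
    PySem.Str.join "\n" (E.flatMap pvLines) = PySem.Str.join "\n" (E.map pvBlock) := by
  exact congrArg String.ofList (pv_join_chars E hE)

theorem pvA (categories : List (String × List String)) :
    format_changelog_section categories =
      PySem.Str.join "\n" ((pvE categories).flatMap pvLines) := by
  show PySem.Str.join "\n"
      (categories.foldl
        (fun lines cp =>
          if cp.1 ∉ pvOrder ∧ cp.2 ≠ [] then
            (cp.2.foldl (fun l e => l ++ [e]) ((lines ++ ["### " ++ cp.1]) ++ [""])) ++ [""]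
          else lines)
        (pvOrder.foldl
          (fun lines category =>
            match PySem.Dict.get? (PySem.Dict.mk categories) category with
            | none => lines
            | some entries =>
              if entries ≠ [] then
                (entries.foldl (fun l e => l ++ [e]) ((lines ++ ["### " ++ category]) ++ [""])) ++ [""]
              else lines)
          [])) = _
  have h1 : (fun (lines : List String) (category : String) =>
      match PySem.Dict.get? (PySem.Dict.mk categories) category with
      | none => lines
      | some entries =>
        if entries ≠ [] then
          (entries.foldl (fun l e => l ++ [e]) ((lines ++ ["### " ++ category]) ++ [""])) ++ [""]
        else lines) =
      fun lines category => lines ++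
        (if pvGetD categories category ≠ [] then pvLines (category, pvGetD categories category)
         else []) := by
    funext lines c
    cases hget : PySem.Dict.get? (PySem.Dict.mk categories) c with
    | none =>
      have hd : pvGetD categories c = [] := PySem.Dict.getD_of_get?_eq_none _ _ hget
      simp [hd]
    | some es =>
      have hd : pvGetD categories c = es := PySem.Dict.getD_of_get?_eq_some _ _ hget
      by_cases hes : es = []
      · simp [hd, hes]
      · simp only [hd, hes, ne_eq, not_false_iff, if_true,
          PySem.List.foldl_append_singleton_eq_self, pvLines]
        simp [List.append_assoc]
  have h2 : (fun (lines : List String) (cp : String × List String) =>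
      if cp.1 ∉ pvOrder ∧ cp.2 ≠ [] then
        (cp.2.foldl (fun l e => l ++ [e]) ((lines ++ ["### " ++ cp.1]) ++ [""])) ++ [""]
      else lines) =
      fun lines cp => lines ++ (if cp.1 ∉ pvOrder ∧ cp.2 ≠ [] then pvLines cp else []) := by
    funext lines cp
    by_cases h : cp.1 ∉ pvOrder ∧ cp.2 ≠ []
    · simp only [h, if_true, PySem.List.foldl_append_singleton_eq_self, pvLines]
      simp [List.append_assoc, h.2]
    · simp [h]
  rw [h1, h2, PySem.List.foldl_append_eq_flatMap, PySem.List.foldl_append_eq_flatMap,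
    List.nil_append]
  congr 1
  rw [pv_flatMap_filter pvOrder (fun c => pvGetD categories c ≠ [])
      (fun c => pvLines (c, pvGetD categories c)),
    pv_flatMap_filter categories (fun p => p.1 ∉ pvOrder ∧ p.2 ≠ []) pvLines]
  unfold pvE
  rw [List.flatMap_append, List.flatMap_map]

theorem pvB (categories : List (String × List String))
    (hnd : (categories.map Prod.fst).Nodup) :
    format_changelog_section_alt categories =
      PySem.Str.join "\n" ((pvE categories).map pvBlock) := by
  show PySem.Str.join "\n"
      (((PySem.List.sorted (categories.map Prod.fst) pvKey false).filter
          (fun c => pvGetD categories c ≠ [])).map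
        (fun c => pvBlock (c, pvGetD categories c))) = _
  have hqmem : ∀ c, pvGetD categories c ≠ [] → c ∈ categories.map Prod.fst := by
    intro c h
    by_contra hc
    have hn : (PySem.Dict.mk categories).get? c = none := by
      exact (PySem.Dict.get?_eq_none_iff_not_mem_keys _ _).mpr hc
    exact h (PySem.Dict.getD_of_get?_eq_none _ _ hn)
  rw [pv_sorted_char _ hnd, List.filter_append, List.map_append]
  have hp1 : (pvOrder.filter (· ∈ categories.map Prod.fst)).filter
      (fun c => pvGetD categories c ≠ []) = pvOrder.filter (fun c => pvGetD categories c ≠ []) := by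
    rw [List.filter_filter]
    apply List.filter_congr
    intro c _
    by_cases hq : pvGetD categories c ≠ []
    · simp [hq, hqmem c hq]
    · simp [hq]
  have hF : ∀ p ∈ categories, pvGetD categories p.1 = p.2 := by
    intro p hp
    have hitems : (p.1, p.2) ∈ (PySem.Dict.mk categories).items := by simpa using hp
    exact PySem.Dict.getD_of_mem_items _ hitems hnd []
  have hp2 : ((categories.map Prod.fst).filter (· ∉ pvOrder)).filter
        (fun c => pvGetD categories c ≠ []) =
      ((categories.map (fun p => p.1)).filter
        (fun c => decide (pvGetD categories c ≠ []) && decide (c ∉ pvOrder))) := by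
    rw [List.filter_filter]
  rw [hp1, hp2]
  have hp3 := pvN categories (fun c => pvGetD categories c)
      (fun c => decide (c ∉ pvOrder)) (fun es => decide (es ≠ [])) hF
  unfold pvE
  rw [List.map_append]
  congr 1
  congr 1
  · simp [Function.comp]
  · rw [show (categories.filter (fun p => p.1 ∉ pvOrder ∧ p.2 ≠ [])) =
        categories.filter (fun p => decide (p.2 ≠ []) && decide (p.1 ∉ pvOrder)) from
        List.filter_congr (fun p _ => pv_decide_swap _ _), ← hp3, List.map_map]
    simp [Function.comp]

theorem pvE_truthy (categories : List (String × List String)) :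
    ∀ p ∈ pvE categories, p.2 ≠ [] := by
  intro p hp
  rcases List.mem_append.mp hp with h | h
  · obtain ⟨c, hc, rfl⟩ := List.mem_map.mp h
    simpa using List.of_mem_filter hc
  · have := List.of_mem_filter h
    simp only [decide_eq_true_eq] at this
    exact this.2

-- ===== VERDICT (by name: the statement is the Claim_ definition above) =====
theorem format_changelog_section_spec : Claim_equal_format_changelog_section := by
  unfold Claim_equal_format_changelog_section
  intro categories _ hpre
  unfold Spec_format_changelog_section
  unfold Pre_format_changelog_section at hpre
  rw [pvA, pvB categories hpre]
  exact pv_join_flatMap _ (pvE_truthy categories)
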